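-- pv_equiv track=rewrite | github.com/kmgmedia/saleschatbotfile | api/product_data.py | detect_product
-- ===== SOURCE A (Python) =====
-- PRODUCT_KEYWORDS = {
--     "smartwatch": "Smartwatch X",
--     "smart watch": "Smartwatch X",
--     "watch": "Smartwatch X",
--
--     "speaker": "Bluetooth Speaker Mini",
--     "bluetooth speaker": "Bluetooth Speaker Mini",
--
--     "earbuds": "Wireless Earbuds Pro",
--     "wireless earbuds": "Wireless Earbuds Pro",
--     "headphones": "Noise-Cancelling Headphones",
--     "noise cancelling": "Noise-Cancelling Headphones",
--
--     "power bank": "Power Bank 20000mAh",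
--     "powerbank": "Power Bank 20000mAh",
--     "portable charger": "Power Bank 20000mAh",
--
--     "smart home hub": "Smart Home Hub",
--     "home hub": "Smart Home Hub",
--     "hub": "Smart Home Hub",
--
--     "action camera": "4K Action Camera",
--     "4k camera": "4K Action Camera",
--     "camera": "4K Action Camera",
--
--     "fitness band": "Fitness Tracker Band",
--     "fitness tracker": "Fitness Tracker Band",
--     "tracker band": "Fitness Tracker Band",
--
--     "led strip": "Smart LED Strip Lights",
--     "led lights": "Smart LED Strip Lights",
--     "strip lights": "Smart LED Strip Lights",
--
--     "projector": "Portable Projector Pro",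
--     "portable projector": "Portable Projector Pro",
--
--     "security camera": "Smart Security Camera",
--     "security cam": "Smart Security Camera",
--
--     "charging pad": "Wireless Charging Pad",
--     "wireless charger": "Wireless Charging Pad",
--
--     "thermostat": "Smart Thermostat",
--
--     "light bulb": "Smart Light Bulb (4-Pack)",
--     "smart bulb": "Smart Light Bulb (4-Pack)",
--
--     "drone": "Mini Drone X2",
--     "mini drone": "Mini Drone X2",
--
--     "laptop stand": "Laptop Stand Pro",
--
--     "keyboard": "Foldable Wireless Keyboard",
--     "wireless keyboard": "Foldable Wireless Keyboard",
--
--     "doorbell": "Smart Doorbell Cam",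
--     "doorbell cam": "Smart Doorbell Cam",
--
--     "vr headset": "VR Headset Max",
--     "vr": "VR Headset Max",
--     "virtual reality": "VR Headset Max",
--
--     "solar charger": "Portable Solar Charger",
--     "solar": "Portable Solar Charger",
--
--     "fitness band pro": "Fitness Band Pro",
--     "advanced fitness": "Fitness Band Pro",
-- }
--
-- def detect_product(user_input):
--     """Detect which product the user is asking about"""
--     user_input_lower = user_input.lower().strip()
--
--     # Exclude bundle/category requests from product detection
--     if any(word in user_input_lower for word in ['bundle', 'category', 'categories', 'all products', 'catalog', 'list']):
--         return None
--
--     # Check for exact matches first (longer phrases)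
--     for keyword in sorted(PRODUCT_KEYWORDS.keys(), key=len, reverse=True):
--         if keyword in user_input_lower:
--             return PRODUCT_KEYWORDS[keyword]
--
--     return None
-- ===== SOURCE B (Python) =====
-- PRODUCT_GROUPS = [
--     ("Smartwatch X", "smartwatch|smart watch|watch"),
--     ("Bluetooth Speaker Mini", "speaker|bluetooth speaker"),
--     ("Wireless Earbuds Pro", "earbuds|wireless earbuds"),
--     ("Noise-Cancelling Headphones", "headphones|noise cancelling"),
--     ("Power Bank 20000mAh", "power bank|powerbank|portable charger"),
--     ("Smart Home Hub", "smart home hub|home hub|hub"),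
--     ("4K Action Camera", "action camera|4k camera|camera"),
--     ("Fitness Tracker Band", "fitness band|fitness tracker|tracker band"),
--     ("Smart LED Strip Lights", "led strip|led lights|strip lights"),
--     ("Portable Projector Pro", "projector|portable projector"),
--     ("Smart Security Camera", "security camera|security cam"),
--     ("Wireless Charging Pad", "charging pad|wireless charger"),
--     ("Smart Thermostat", "thermostat"),
--     ("Smart Light Bulb (4-Pack)", "light bulb|smart bulb"),
--     ("Mini Drone X2", "drone|mini drone"),
--     ("Laptop Stand Pro", "laptop stand"),
--     ("Foldable Wireless Keyboard", "keyboard|wireless keyboard"),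
--     ("Smart Doorbell Cam", "doorbell|doorbell cam"),
--     ("VR Headset Max", "vr headset|vr|virtual reality"),
--     ("Portable Solar Charger", "solar charger|solar"),
--     ("Fitness Band Pro", "fitness band pro|advanced fitness"),
-- ]
--
-- def detect_product(user_input):
--     """Detect which product the user asks about: one pass over grouped keywords,
--     keeping the longest match (strict '>' keeps earliest-wins on length ties)."""
--     text = user_input.lower().strip()
--     for word in ('bundle', 'category', 'categories', 'all products', 'catalog', 'list'):
--         if word in text:
--             return None
--     best, best_len = None, -1
--     for product, keywords in PRODUCT_GROUPS:
--         for kw in keywords.split("|"):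
--             if kw in text and len(kw) > best_len:
--                 best, best_len = product, len(kw)
--     return best
-- ===== Notes on version B (the rewrite author's own statement) =====
-- stated objective: simpler
-- what changed: A sorts all 47 keywords by length on every call and returns the first substring match; B keeps a per-product grouped keyword table and does one nested pass keeping the longest match seen so far (strict '>' preserves A's earliest-wins tie-break), with no sort and no dict lookup.
import Mathlib
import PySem

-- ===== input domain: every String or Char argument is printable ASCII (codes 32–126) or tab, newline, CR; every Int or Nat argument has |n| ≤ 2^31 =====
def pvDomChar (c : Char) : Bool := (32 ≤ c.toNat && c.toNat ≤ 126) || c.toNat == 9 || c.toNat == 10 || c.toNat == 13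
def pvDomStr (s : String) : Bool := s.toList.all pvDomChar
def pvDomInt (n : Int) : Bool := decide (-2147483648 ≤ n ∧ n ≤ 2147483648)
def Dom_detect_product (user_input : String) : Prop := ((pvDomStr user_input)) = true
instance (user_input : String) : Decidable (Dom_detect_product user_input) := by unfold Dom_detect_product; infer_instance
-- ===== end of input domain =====

-- B replaces A's sort-then-first-match over a flat keyword dict by a single nested pass over
-- a per-product grouped keyword table, keeping the longest match so far (strict '>' keeps
-- A's earliest-wins tie-breaking); objective: simpler (no sort, no dict lookup).

def pvKW : List (String × String) := [
  ("smartwatch", "Smartwatch X"),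
  ("smart watch", "Smartwatch X"),
  ("watch", "Smartwatch X"),
  ("speaker", "Bluetooth Speaker Mini"),
  ("bluetooth speaker", "Bluetooth Speaker Mini"),
  ("earbuds", "Wireless Earbuds Pro"),
  ("wireless earbuds", "Wireless Earbuds Pro"),
  ("headphones", "Noise-Cancelling Headphones"),
  ("noise cancelling", "Noise-Cancelling Headphones"),
  ("power bank", "Power Bank 20000mAh"),
  ("powerbank", "Power Bank 20000mAh"),
  ("portable charger", "Power Bank 20000mAh"),
  ("smart home hub", "Smart Home Hub"),
  ("home hub", "Smart Home Hub"),
  ("hub", "Smart Home Hub"),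
  ("action camera", "4K Action Camera"),
  ("4k camera", "4K Action Camera"),
  ("camera", "4K Action Camera"),
  ("fitness band", "Fitness Tracker Band"),
  ("fitness tracker", "Fitness Tracker Band"),
  ("tracker band", "Fitness Tracker Band"),
  ("led strip", "Smart LED Strip Lights"),
  ("led lights", "Smart LED Strip Lights"),
  ("strip lights", "Smart LED Strip Lights"),
  ("projector", "Portable Projector Pro"),
  ("portable projector", "Portable Projector Pro"),
  ("security camera", "Smart Security Camera"),
  ("security cam", "Smart Security Camera"),
  ("charging pad", "Wireless Charging Pad"),
  ("wireless charger", "Wireless Charging Pad"),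
  ("thermostat", "Smart Thermostat"),
  ("light bulb", "Smart Light Bulb (4-Pack)"),
  ("smart bulb", "Smart Light Bulb (4-Pack)"),
  ("drone", "Mini Drone X2"),
  ("mini drone", "Mini Drone X2"),
  ("laptop stand", "Laptop Stand Pro"),
  ("keyboard", "Foldable Wireless Keyboard"),
  ("wireless keyboard", "Foldable Wireless Keyboard"),
  ("doorbell", "Smart Doorbell Cam"),
  ("doorbell cam", "Smart Doorbell Cam"),
  ("vr headset", "VR Headset Max"),
  ("vr", "VR Headset Max"),
  ("virtual reality", "VR Headset Max"),
  ("solar charger", "Portable Solar Charger"),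
  ("solar", "Portable Solar Charger"),
  ("fitness band pro", "Fitness Band Pro"),
  ("advanced fitness", "Fitness Band Pro")]

def PRODUCT_KEYWORDS : PySem.Dict String String := PySem.Dict.ofList pvKW

-- ===== PORT A =====
def detect_product (user_input : String) : Option String :=
  let user_input_lower := PySem.Str.strip (PySem.Str.lower user_input)
  if ["bundle", "category", "categories", "all products", "catalog", "list"].any
      (fun word => PySem.Str.isIn word user_input_lower) then
    none
  else
    match (PySem.List.sorted PRODUCT_KEYWORDS.keys (fun k => PySem.Str.len k) true).find?
        (fun keyword => PySem.Str.isIn keyword user_input_lower) with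
    | some keyword => PRODUCT_KEYWORDS.get? keyword
    | none => none

-- ===== PORT B =====
def PRODUCT_GROUPS : List (String × String) := [
  ("Smartwatch X", "smartwatch|smart watch|watch"),
  ("Bluetooth Speaker Mini", "speaker|bluetooth speaker"),
  ("Wireless Earbuds Pro", "earbuds|wireless earbuds"),
  ("Noise-Cancelling Headphones", "headphones|noise cancelling"),
  ("Power Bank 20000mAh", "power bank|powerbank|portable charger"),
  ("Smart Home Hub", "smart home hub|home hub|hub"),
  ("4K Action Camera", "action camera|4k camera|camera"),
  ("Fitness Tracker Band", "fitness band|fitness tracker|tracker band"),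
  ("Smart LED Strip Lights", "led strip|led lights|strip lights"),
  ("Portable Projector Pro", "projector|portable projector"),
  ("Smart Security Camera", "security camera|security cam"),
  ("Wireless Charging Pad", "charging pad|wireless charger"),
  ("Smart Thermostat", "thermostat"),
  ("Smart Light Bulb (4-Pack)", "light bulb|smart bulb"),
  ("Mini Drone X2", "drone|mini drone"),
  ("Laptop Stand Pro", "laptop stand"),
  ("Foldable Wireless Keyboard", "keyboard|wireless keyboard"),
  ("Smart Doorbell Cam", "doorbell|doorbell cam"),
  ("VR Headset Max", "vr headset|vr|virtual reality"),
  ("Portable Solar Charger", "solar charger|solar"),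
  ("Fitness Band Pro", "fitness band pro|advanced fitness")]

-- Source B's keywords.split("|"): sep is the non-empty literal "|", so split? never returns none
def pvSplit (s : String) : List String := (PySem.Str.split? s "|").getD []

def detect_product_alt (user_input : String) : Option String :=
  let text := PySem.Str.strip (PySem.Str.lower user_input)
  if ["bundle", "category", "categories", "all products", "catalog", "list"].any
      (fun word => PySem.Str.isIn word text) then
    none
  else
    (PRODUCT_GROUPS.foldl
      (fun st g =>
        (pvSplit g.2).foldl
          (fun st kw =>
            if PySem.Str.isIn kw text && decide (st.2 < PySem.Str.len kw) then
              (some g.1, PySem.Str.len kw)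
            else st) st)
      ((none : Option String), (-1 : Int))).1

-- ===== PRECONDITION & SPEC =====
def Spec_detect_product (user_input : String) (out : Option String) : Prop := out = detect_product_alt user_input
instance (user_input : String) (out : Option String) : Decidable (Spec_detect_product user_input out) := by unfold Spec_detect_product; infer_instance

-- ===== CLAIM (what is proved, stated in full; the proofs are below) =====
def Claim_equal_detect_product : Prop := ∀ (user_input : String), Dom_detect_product user_input → Spec_detect_product user_input (detect_product user_input)

-- ===== LEMMAS AND PROOFS =====

-- stable insertion (descending by keyword length) and the stable sort it generates
def pvIns (x : String × String) : List (String × String) → List (String × String)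
  | [] => [x]
  | y :: r => if PySem.Str.len x.1 < PySem.Str.len y.1 then y :: pvIns x r else x :: y :: r

def pvSort : List (String × String) → List (String × String)
  | [] => []
  | x :: t => pvIns x (pvSort t)

-- first longest q-match in insertion order, head recursion (ties prefer the earlier element)
def pvStep (q : String × String → Bool) (x : String × String) :
    Option (String × String) → Option (String × String)
  | none => if q x then some x else none
  | some y => if q x && decide (PySem.Str.len y.1 ≤ PySem.Str.len x.1) then some x else some y

def pvMaxSel (q : String × String → Bool) : List (String × String) → Option (String × String)
  | [] => none
  | x :: t => pvStep q x (pvMaxSel q t)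

-- B's group table flattened into (keyword, product) pairs in traversal order
def pvFlat : List (String × String) :=
  PRODUCT_GROUPS.flatMap (fun g => (pvSplit g.2).map (fun kw => (kw, g.1)))

lemma pvlen (s : String) : PySem.Str.len s = (s.length : Int) := by
  simp [PySem.Str.len_eq]

lemma pvMem_ins {y x : String × String} {s : List (String × String)} :
    y ∈ pvIns x s ↔ y = x ∨ y ∈ s := by
  induction s with
  | nil => simp [pvIns]
  | cons z r ih =>
    simp only [pvIns]
    split_ifs with h
    · simp only [List.mem_cons, ih]; tauto
    · simp only [List.mem_cons]

lemma pvMem_sort {y : String × String} {l : List (String × String)} :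
    y ∈ pvSort l ↔ y ∈ l := by
  induction l with
  | nil => simp [pvSort]
  | cons x t ih => simp [pvSort, pvMem_ins, ih]

lemma pvIns_pairwise {x : String × String} {s : List (String × String)}
    (h : s.Pairwise (fun a b => PySem.Str.len b.1 ≤ PySem.Str.len a.1)) :
    (pvIns x s).Pairwise (fun a b => PySem.Str.len b.1 ≤ PySem.Str.len a.1) := by
  induction s with
  | nil => simp [pvIns]
  | cons y r ih =>
    rcases List.pairwise_cons.1 h with ⟨hy, hr⟩
    simp only [pvIns]
    split_ifs with hc
    · refine List.pairwise_cons.2 ⟨?_, ih hr⟩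
      intro z hz
      rcases pvMem_ins.1 hz with rfl | hz
      · omega
      · exact hy z hz
    · refine List.pairwise_cons.2 ⟨?_, h⟩
      intro z hz
      rcases List.mem_cons.1 hz with rfl | hz
      · omega
      · have := hy z hz; omega

lemma pvSort_pairwise (l : List (String × String)) :
    (pvSort l).Pairwise (fun a b => PySem.Str.len b.1 ≤ PySem.Str.len a.1) := by
  induction l with
  | nil => simp [pvSort]
  | cons x t ih => exact pvIns_pairwise ih

lemma pvFind_ins (q : String × String → Bool) (x : String × String)
    (s : List (String × String))
    (h : s.Pairwise (fun a b => PySem.Str.len b.1 ≤ PySem.Str.len a.1)) :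
    (pvIns x s).find? q = pvStep q x (s.find? q) := by
  induction s with
  | nil => cases hqx : q x <;> simp [pvIns, pvStep, List.find?, hqx]
  | cons y r ih =>
    rcases List.pairwise_cons.1 h with ⟨hy, hr⟩
    by_cases hc : PySem.Str.len x.1 < PySem.Str.len y.1
    · rw [pvIns, if_pos hc]
      cases hqy : q y with
      | true =>
        rw [List.find?_cons_of_pos hqy, List.find?_cons_of_pos hqy, pvStep]
        rw [decide_eq_false (show ¬ PySem.Str.len y.1 ≤ PySem.Str.len x.1 by omega),
          Bool.and_false, if_neg Bool.false_ne_true]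
      | false =>
        rw [List.find?_cons_of_neg (by simp [hqy]), List.find?_cons_of_neg (by simp [hqy])]
        exact ih hr
    · rw [pvIns, if_neg hc]
      cases hqx : q x with
      | true =>
        rw [List.find?_cons_of_pos hqx]
        cases hfy : (y :: r).find? q with
        | none => rw [pvStep, if_pos hqx]
        | some z =>
          have hz := List.mem_of_find?_eq_some hfy
          have hlz : PySem.Str.len z.1 ≤ PySem.Str.len x.1 := by
            rcases List.mem_cons.1 hz with rfl | hz'
            · omega
            · have := hy z hz'; omega
          rw [pvStep, if_pos (by rw [hqx, Bool.true_and]; simpa using hlz)]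
      | false =>
        rw [List.find?_cons_of_neg (by simp [hqx])]
        cases hfy : (y :: r).find? q with
        | none => rw [pvStep, if_neg (by simp [hqx])]
        | some z => rw [pvStep, if_neg (by simp [hqx])]

lemma pvFind_sort (q : String × String → Bool) (l : List (String × String)) :
    (pvSort l).find? q = pvMaxSel q l := by
  induction l with
  | nil => simp [pvSort, pvMaxSel]
  | cons x t ih =>
    rw [pvSort, pvFind_ins q x (pvSort t) (pvSort_pairwise t), ih, pvMaxSel]

lemma pvFoldB (q : String × String → Bool) (l : List (String × String)) :
    ∀ (b : Option String) (n : Int),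
      l.foldl
        (fun st kv =>
          if q kv && decide (st.2 < PySem.Str.len kv.1) then (some kv.2, PySem.Str.len kv.1)
          else st) (b, n) =
      match pvMaxSel q l with
      | none => (b, n)
      | some y => if n < PySem.Str.len y.1 then (some y.2, PySem.Str.len y.1) else (b, n) := by
  induction l with
  | nil => intro b n; simp [pvMaxSel]
  | cons x t ih =>
    intro b n
    rw [List.foldl_cons]
    show (t.foldl _ (if q x && decide (n < PySem.Str.len x.1) then (some x.2, PySem.Str.len x.1) else (b, n))) = _
    have lx := pvlen x.1
    by_cases hqx : q x = true
    · by_cases hn : n < PySem.Str.len x.1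
      · have hnN : n < (x.1.length : Int) := by omega
        rw [if_pos (by rw [hqx, Bool.true_and]; simpa using hn), ih (some x.2) (PySem.Str.len x.1)]
        show _ = (match pvStep q x (pvMaxSel q t) with
          | none => (b, n)
          | some y => if n < PySem.Str.len y.1 then (some y.2, PySem.Str.len y.1) else (b, n))
        cases hm : pvMaxSel q t with
        | none => simp [pvStep, hqx, hnN]
        | some y =>
          have ly := pvlen y.1
          by_cases hle : PySem.Str.len y.1 ≤ PySem.Str.len x.1
          · have hleN : y.1.length ≤ x.1.length := by omega
            have h1N : ¬ x.1.length < y.1.length := by omega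
            simp [pvStep, hqx, hleN, h1N, hnN]
          · have hleN : ¬ y.1.length ≤ x.1.length := by omega
            have h1N : x.1.length < y.1.length := by omega
            have h2N : n < (y.1.length : Int) := by omega
            simp [pvStep, hqx, hleN, h1N, h2N]
      · have hnN : ¬ n < (x.1.length : Int) := by omega
        rw [if_neg (by rw [hqx, Bool.true_and]; simpa using hn), ih b n]
        show _ = (match pvStep q x (pvMaxSel q t) with
          | none => (b, n)
          | some y => if n < PySem.Str.len y.1 then (some y.2, PySem.Str.len y.1) else (b, n))
        cases hm : pvMaxSel q t with
        | none => simp [pvStep, hqx, hnN]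
        | some y =>
          have ly := pvlen y.1
          by_cases hle : PySem.Str.len y.1 ≤ PySem.Str.len x.1
          · have hleN : y.1.length ≤ x.1.length := by omega
            have h2N : ¬ n < (y.1.length : Int) := by omega
            simp [pvStep, hqx, hleN, h2N]
            exact fun h => absurd h hnN
          · have hleN : ¬ y.1.length ≤ x.1.length := by omega
            simp [pvStep, hqx, hleN]
    · rw [if_neg (by simp [hqx]), ih b n]
      show _ = (match pvStep q x (pvMaxSel q t) with
        | none => (b, n)
        | some y => if n < PySem.Str.len y.1 then (some y.2, PySem.Str.len y.1) else (b, n))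
      cases hm : pvMaxSel q t with
      | none => simp [pvStep, hqx]
      | some y => simp [pvStep, hqx]

-- B's nested fold over the group table equals the flat fold over its flattening
lemma pvNested (low : String) (gs : List (String × String)) :
    ∀ st : Option String × Int,
      gs.foldl
        (fun st g =>
          (pvSplit g.2).foldl
            (fun st kw =>
              if PySem.Str.isIn kw low && decide (st.2 < PySem.Str.len kw) then
                (some g.1, PySem.Str.len kw)
              else st) st) st
      = (gs.flatMap (fun g => (pvSplit g.2).map (fun kw => (kw, g.1)))).foldl
          (fun st kv =>
            if PySem.Str.isIn kv.1 low && decide (st.2 < PySem.Str.len kv.1) then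
              (some kv.2, PySem.Str.len kv.1)
            else st) st := by
  induction gs with
  | nil => intro st; simp
  | cons g t ih =>
    intro st
    rw [List.foldl_cons, List.flatMap_cons, List.foldl_append]
    rw [show (((pvSplit g.2).map (fun kw => (kw, g.1))).foldl
          (fun st kv =>
            if PySem.Str.isIn kv.1 low && decide (st.2 < PySem.Str.len kv.1) then
              (some kv.2, PySem.Str.len kv.1)
            else st) st)
        = ((pvSplit g.2).foldl
            (fun st kw =>
              if PySem.Str.isIn kw low && decide (st.2 < PySem.Str.len kw) then
                (some g.1, PySem.Str.len kw)
              else st) st) from by rw [List.foldl_map]]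
    exact ih _

set_option maxRecDepth 40000 in
lemma pvSorted_keys :
    PySem.List.sorted PRODUCT_KEYWORDS.keys (fun k => PySem.Str.len k) true
      = (pvSort pvKW).map Prod.fst := by decide

set_option maxRecDepth 40000 in
lemma pvItems_flat : pvFlat = pvKW := by decide

set_option maxRecDepth 40000 in
lemma pvGet (p : String × String) (hp : p ∈ pvSort pvKW) :
    PRODUCT_KEYWORDS.get? p.1 = some p.2 := by
  have hmem : p ∈ pvKW := pvMem_sort.1 hp
  have hit : (p.1, p.2) ∈ PRODUCT_KEYWORDS.items := by
    have : PRODUCT_KEYWORDS.items = pvKW := by decide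
    rw [this]; exact hmem
  exact PySem.Dict.get?_of_mem_items _ hit (PySem.Dict.nodup_keys_ofList _)

def pvGuard (low : String) : Bool :=
  ["bundle", "category", "categories", "all products", "catalog", "list"].any
    (fun word => PySem.Str.isIn word low)

lemma pvFind_keys (low : String) :
    ((pvSort pvKW).map Prod.fst).find? (fun k => PySem.Str.isIn k low)
      = (pvMaxSel (fun kv : String × String => PySem.Str.isIn kv.1 low) pvKW).map Prod.fst := by
  rw [List.find?_map, pvFind_sort]
  rfl

set_option maxHeartbeats 1000000 in
lemma pvA_eq (u : String) (hg : pvGuard (PySem.Str.strip (PySem.Str.lower u)) = false) :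
    detect_product u
      = (match pvMaxSel
            (fun kv : String × String =>
              PySem.Str.isIn kv.1 (PySem.Str.strip (PySem.Str.lower u))) pvKW with
        | none => none
        | some y => some y.2) := by
  unfold detect_product
  show (if pvGuard (PySem.Str.strip (PySem.Str.lower u)) = true then none
        else
          match (PySem.List.sorted PRODUCT_KEYWORDS.keys (fun k => PySem.Str.len k) true).find?
              (fun keyword => PySem.Str.isIn keyword (PySem.Str.strip (PySem.Str.lower u))) with
          | some keyword => PRODUCT_KEYWORDS.get? keyword
          | none => none) = _
  rw [hg, if_neg (show ¬ (false = true) from by decide)]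
  rw [pvSorted_keys, pvFind_keys (PySem.Str.strip (PySem.Str.lower u))]
  cases hm : pvMaxSel
      (fun kv : String × String =>
        PySem.Str.isIn kv.1 (PySem.Str.strip (PySem.Str.lower u))) pvKW with
  | none => rfl
  | some y =>
    show PRODUCT_KEYWORDS.get? y.1 = some y.2
    refine pvGet y ?_
    apply List.mem_of_find?_eq_some
      (p := fun kv : String × String =>
        PySem.Str.isIn kv.1 (PySem.Str.strip (PySem.Str.lower u)))
    rw [pvFind_sort, hm]

set_option maxHeartbeats 1000000 in
lemma pvB_eq (u : String) (hg : pvGuard (PySem.Str.strip (PySem.Str.lower u)) = false) :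
    detect_product_alt u
      = (match pvMaxSel
            (fun kv : String × String =>
              PySem.Str.isIn kv.1 (PySem.Str.strip (PySem.Str.lower u))) pvKW with
        | none => none
        | some y => some y.2) := by
  unfold detect_product_alt
  show (if pvGuard (PySem.Str.strip (PySem.Str.lower u)) = true then none
        else
          (PRODUCT_GROUPS.foldl
            (fun st g =>
              (pvSplit g.2).foldl
                (fun st kw =>
                  if PySem.Str.isIn kw (PySem.Str.strip (PySem.Str.lower u)) &&
                      decide (st.2 < PySem.Str.len kw) then
                    (some g.1, PySem.Str.len kw)
                  else st) st)
            ((none : Option String), (-1 : Int))).1) = _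
  rw [hg, if_neg (show ¬ (false = true) from by decide)]
  rw [pvNested (PySem.Str.strip (PySem.Str.lower u)) PRODUCT_GROUPS]
  rw [show (PRODUCT_GROUPS.flatMap (fun g => (pvSplit g.2).map (fun kw => (kw, g.1)))) = pvFlat
      from rfl, pvItems_flat]
  rw [pvFoldB (fun kv : String × String =>
        PySem.Str.isIn kv.1 (PySem.Str.strip (PySem.Str.lower u))) pvKW none (-1)]
  cases hm : pvMaxSel
      (fun kv : String × String =>
        PySem.Str.isIn kv.1 (PySem.Str.strip (PySem.Str.lower u))) pvKW with
  | none => rfl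
  | some y =>
    have hpos : (-1 : Int) < PySem.Str.len y.1 := by
      have := pvlen y.1; omega
    show (if (-1 : Int) < PySem.Str.len y.1 then (some y.2, PySem.Str.len y.1)
          else ((none : Option String), (-1 : Int))).1 = some y.2
    rw [if_pos hpos]

-- ===== VERDICT (by name: the statement is the Claim_ definition above) =====
theorem detect_product_spec : Claim_equal_detect_product := by
  intro user_input _
  show detect_product user_input = detect_product_alt user_input
  cases hg : pvGuard (PySem.Str.strip (PySem.Str.lower user_input)) with
  | true =>
    have hA : detect_product user_input = none := by
      unfold detect_product
      show (if pvGuard (PySem.Str.strip (PySem.Str.lower user_input)) = true then none else _) = none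
      rw [hg]; rfl
    have hB : detect_product_alt user_input = none := by
      unfold detect_product_alt
      show (if pvGuard (PySem.Str.strip (PySem.Str.lower user_input)) = true then none else _) = none
      rw [hg]; rfl
    rw [hA, hB]
  | false => rw [pvA_eq user_input hg, pvB_eq user_input hg]
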